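-- pv_equiv track=rewrite | github.com/dkvhin/ha-flexispot-standing-desk | flexispot.py | decode_digit
-- ===== SOURCE A (Python) =====
-- def decode_digit(b):
--     s = bytearray(8)
--     for i in range(8):
--         h = 0x01 << i
--         s[i] = (b & h) == h
--
--     if s[0] and s[1] and s[2] and s[3] and s[4] and s[5] and not s[6]:
--         return 0
--     elif not s[0] and s[1] and s[2] and not s[3] and not s[4] and not s[5] and not s[6]:
--         return 1
--     elif s[0] and s[1] and not s[2] and s[3] and s[4] and not s[5] and s[6]:
--         return 2
--     elif s[0] and s[1] and s[2] and s[3] and not s[4] and not s[5] and s[6]: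
--         return 3
--     elif not s[0] and s[1] and s[2] and not s[3] and not s[4] and s[5] and s[6]:
--         return 4
--     elif s[0] and not s[1] and s[2] and s[3] and not s[4] and s[5] and s[6]:
--         return 5
--     elif s[0] and not s[1] and s[2] and s[3] and s[4] and s[5] and s[6]:
--         return 6
--     elif s[0] and s[1] and s[2] and not s[3] and not s[4] and not s[5] and not s[6]:
--         return 7
--     elif s[0] and s[1] and s[2] and s[3] and s[4] and s[5] and s[6]:
--         return 8
--     elif s[0] and s[1] and s[2] and s[3] and not s[4] and s[5] and s[6]:
--         return 9
--
--     raise ValueError("unknown digit")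
-- ===== SOURCE B (Python) =====
-- # Segment patterns re-encoded forward: digit -> canonical 7-bit pattern.
-- _CANON = [0x3F, 0x06, 0x5B, 0x4F, 0x66, 0x6D, 0x7D, 0x07, 0x7F, 0x6F]
--
-- def decode_digit(b):
--     # Decision tree: the number of lit segments narrows the candidates,
--     # one or two distinguishing bits pick the digit, and the candidate is
--     # confirmed against the forward encoding.
--     t = b & 0x7F
--     n = bin(t).count("1")
--     if n == 2:
--         d = 1
--     elif n == 3:
--         d = 7
--     elif n == 4:
--         d = 4
--     elif n == 5:
--         if not (t & 0x02):
--             d = 5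
--         elif t & 0x04:
--             d = 3
--         else:
--             d = 2
--     elif n == 6:
--         if not (t & 0x40):
--             d = 0
--         elif t & 0x02:
--             d = 9
--         else:
--             d = 6
--     elif n == 7:
--         d = 8
--     else:
--         raise ValueError("unknown digit")
--     if t != _CANON[d]:
--         raise ValueError("unknown digit")
--     return d
-- ===== Notes on version B (the rewrite author's own statement) =====
-- stated objective: alternative
-- what changed: Replaced the per-bit unpacking loop and ten-conjunction if/elif chain with a popcount-driven decision tree (segment count selects the candidate digit, one or two distinguishing bits disambiguate) plus a confirmation against the forward digit-to-pattern encoding.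
import Mathlib
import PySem

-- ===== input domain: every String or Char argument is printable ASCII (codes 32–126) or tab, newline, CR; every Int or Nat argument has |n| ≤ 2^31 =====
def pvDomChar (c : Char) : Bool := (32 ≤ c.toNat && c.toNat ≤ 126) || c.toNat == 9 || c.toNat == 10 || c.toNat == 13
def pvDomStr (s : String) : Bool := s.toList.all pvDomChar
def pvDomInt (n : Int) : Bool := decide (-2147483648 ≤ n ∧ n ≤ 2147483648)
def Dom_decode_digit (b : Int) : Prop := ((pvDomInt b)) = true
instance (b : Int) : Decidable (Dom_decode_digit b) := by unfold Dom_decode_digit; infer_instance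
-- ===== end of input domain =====

-- B replaces A's bit-unpacking loop and ten-conjunction if/elif chain with a popcount-driven
-- decision tree confirmed against the forward digit->pattern encoding (objective: alternative);
-- on unknown patterns both raise ValueError, which Pre_ excludes.

-- ===== PORT A =====
-- s[i] = (b & (0x01 << i)) == (0x01 << i)
def pyBit (b : Int) (i : Nat) : Bool := decide (PySem.Int.band b ((1 : Int) <<< i) = (1 : Int) <<< i)

def decode_digit (b : Int) : Int :=
  let s : List Bool := (List.range 8).map (pyBit b)
  let g : Nat → Bool := fun i => s.getD i false
  if g 0 && g 1 && g 2 && g 3 && g 4 && g 5 && !g 6 then 0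
  else if !g 0 && g 1 && g 2 && !g 3 && !g 4 && !g 5 && !g 6 then 1
  else if g 0 && g 1 && !g 2 && g 3 && g 4 && !g 5 && g 6 then 2
  else if g 0 && g 1 && g 2 && g 3 && !g 4 && !g 5 && g 6 then 3
  else if !g 0 && g 1 && g 2 && !g 3 && !g 4 && g 5 && g 6 then 4
  else if g 0 && !g 1 && g 2 && g 3 && !g 4 && g 5 && g 6 then 5
  else if g 0 && !g 1 && g 2 && g 3 && g 4 && g 5 && g 6 then 6
  else if g 0 && g 1 && g 2 && !g 3 && !g 4 && !g 5 && !g 6 then 7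
  else if g 0 && g 1 && g 2 && g 3 && g 4 && g 5 && g 6 then 8
  else if g 0 && g 1 && g 2 && g 3 && !g 4 && g 5 && g 6 then 9
  else -1  -- Python raises ValueError("unknown digit") here; excluded by Pre_

-- ===== PORT B =====
-- bin(t).count("1") for t ≥ 0: standard binary popcount, fuel = n suffices since n/2 halves
def popcntAux : Nat → Nat → Nat
  | 0, _ => 0
  | f + 1, n => if n = 0 then 0 else n % 2 + popcntAux f (n / 2)

def popcnt (n : Nat) : Nat := popcntAux n n

-- _CANON, the forward digit -> pattern encoding
def canonTable : List Int := [0x3F, 0x06, 0x5B, 0x4F, 0x66, 0x6D, 0x7D, 0x07, 0x7F, 0x6F]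

def decode_digit_alt (b : Int) : Int :=
  let t := PySem.Int.band b 0x7F
  let n := popcnt t.toNat
  let d : Int :=
    if n = 2 then 1
    else if n = 3 then 7
    else if n = 4 then 4
    else if n = 5 then
      if PySem.Int.band t 0x02 = 0 then 5
      else if PySem.Int.band t 0x04 ≠ 0 then 3
      else 2
    else if n = 6 then
      if PySem.Int.band t 0x40 = 0 then 0
      else if PySem.Int.band t 0x02 ≠ 0 then 9
      else 6
    else if n = 7 then 8
    else -1  -- Python raises ValueError("unknown digit") here; excluded by Pre_
  if d = -1 then -1
  else if t ≠ canonTable.getD d.toNat 0 then -1  -- Python raises ValueError here (d is always 0..9 at this point, so _CANON[d] never raises); excluded by Pre_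
  else d

-- ===== PRECONDITION & SPEC =====
-- Pre_ excludes exactly the inputs on which the Python A (and B) raise ValueError("unknown digit"):
-- those whose low seven bits (= b mod 2^7) are no digit's segment pattern.
def segPatterns : List Int := [0x3F, 0x06, 0x5B, 0x4F, 0x66, 0x6D, 0x7D, 0x07, 0x7F, 0x6F]

def Pre_decode_digit (b : Int) : Prop :=
  ∃ d ∈ List.range 10, segPatterns[d]? = some (b % 2 ^ 7)
instance (b : Int) : Decidable (Pre_decode_digit b) := by unfold Pre_decode_digit; infer_instance

def pvWitness_decode_digit : Int := 0x5B

def Spec_decode_digit (b : Int) (out : Int) : Prop := out = decode_digit_alt b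
instance (b : Int) (out : Int) : Decidable (Spec_decode_digit b out) := by unfold Spec_decode_digit; infer_instance

-- ===== CLAIM (what is proved, stated in full; the proofs are below) =====
def Claim_equal_decode_digit : Prop := ∀ (b : Int), Dom_decode_digit b → Pre_decode_digit b → Spec_decode_digit b (decode_digit b)

-- ===== LEMMAS AND PROOFS =====

-- A's if/elif chain as a function of the low seven bits t (0 ≤ t < 128), proof helper only
def chain (t : Nat) : Int :=
  let g : Nat → Bool := fun i => decide (t &&& (1 <<< i) = 1 <<< i)
  if g 0 && g 1 && g 2 && g 3 && g 4 && g 5 && !g 6 then 0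
  else if !g 0 && g 1 && g 2 && !g 3 && !g 4 && !g 5 && !g 6 then 1
  else if g 0 && g 1 && !g 2 && g 3 && g 4 && !g 5 && g 6 then 2
  else if g 0 && g 1 && g 2 && g 3 && !g 4 && !g 5 && g 6 then 3
  else if !g 0 && g 1 && g 2 && !g 3 && !g 4 && g 5 && g 6 then 4
  else if g 0 && !g 1 && g 2 && g 3 && !g 4 && g 5 && g 6 then 5
  else if g 0 && !g 1 && g 2 && g 3 && g 4 && g 5 && g 6 then 6
  else if g 0 && g 1 && g 2 && !g 3 && !g 4 && !g 5 && !g 6 then 7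
  else if g 0 && g 1 && g 2 && g 3 && g 4 && g 5 && g 6 then 8
  else if g 0 && g 1 && g 2 && g 3 && !g 4 && g 5 && g 6 then 9
  else -1

-- same, with the bit test A's port performs on a NEGATIVE b (t = (-b-1).toNat masked to seven bits)
def chainN (t : Nat) : Int :=
  let g : Nat → Bool := fun i => decide ((1 <<< i) - ((1 <<< i) &&& t) = 1 <<< i)
  if g 0 && g 1 && g 2 && g 3 && g 4 && g 5 && !g 6 then 0
  else if !g 0 && g 1 && g 2 && !g 3 && !g 4 && !g 5 && !g 6 then 1
  else if g 0 && g 1 && !g 2 && g 3 && g 4 && !g 5 && g 6 then 2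
  else if g 0 && g 1 && g 2 && g 3 && !g 4 && !g 5 && g 6 then 3
  else if !g 0 && g 1 && g 2 && !g 3 && !g 4 && g 5 && g 6 then 4
  else if g 0 && !g 1 && g 2 && g 3 && !g 4 && g 5 && g 6 then 5
  else if g 0 && !g 1 && g 2 && g 3 && g 4 && g 5 && g 6 then 6
  else if g 0 && g 1 && g 2 && !g 3 && !g 4 && !g 5 && !g 6 then 7
  else if g 0 && g 1 && g 2 && g 3 && g 4 && g 5 && g 6 then 8
  else if g 0 && g 1 && g 2 && g 3 && !g 4 && g 5 && g 6 then 9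
  else -1

-- B's body as a function of the masked value x = b & 0x7F, proof helper only
def altOf (x : Int) : Int :=
  let n := popcnt x.toNat
  let d : Int :=
    if n = 2 then 1
    else if n = 3 then 7
    else if n = 4 then 4
    else if n = 5 then
      if PySem.Int.band x 0x02 = 0 then 5
      else if PySem.Int.band x 0x04 ≠ 0 then 3
      else 2
    else if n = 6 then
      if PySem.Int.band x 0x40 = 0 then 0
      else if PySem.Int.band x 0x02 ≠ 0 then 9
      else 6
    else if n = 7 then 8
    else -1
  if d = -1 then -1
  else if x ≠ canonTable.getD d.toNat 0 then -1
  else d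

theorem land127_land (i : Nat) (hi : i < 7) (n : Nat) :
    n &&& (1 <<< i) = (n &&& 127) &&& (1 <<< i) := by
  have h : (127 : Nat) &&& (1 <<< i) = 1 <<< i := by interval_cases i <;> decide
  rw [Nat.land_assoc, h]

theorem land_land127 (i : Nat) (hi : i < 7) (n : Nat) :
    (1 <<< i) &&& n = (1 <<< i) &&& (127 &&& n) := by
  have h : ((1 : Nat) <<< i) &&& 127 = 1 <<< i := by interval_cases i <;> decide
  conv_lhs => rw [← h]
  rw [Nat.land_assoc]

theorem shift_cast (i : Nat) (hi : i < 8) : ((1 : Int) <<< i) = (((1 : Nat) <<< i : Nat) : Int) := by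
  interval_cases i <;> rfl

theorem pyBit_eval_pos (b : Int) (hb : 0 ≤ b) (i : Nat) (hi : i < 7) :
    pyBit b i = decide ((b.toNat &&& 127) &&& (1 <<< i) = 1 <<< i) := by
  unfold pyBit PySem.Int.band
  rw [shift_cast i (by omega), if_pos hb,
    if_pos (by exact_mod_cast Int.natCast_nonneg _)]
  simp only [Int.toNat_natCast]
  rw [← land127_land i hi]
  exact decide_eq_decide.mpr Nat.cast_inj

theorem pyBit_eval_neg (b : Int) (hb : ¬ 0 ≤ b) (i : Nat) (hi : i < 7) :
    pyBit b i = decide ((1 <<< i) - ((1 <<< i) &&& (127 &&& (-b - 1).toNat)) = 1 <<< i) := by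
  unfold pyBit PySem.Int.band
  rw [shift_cast i (by omega), if_neg hb,
    if_pos (by exact_mod_cast Int.natCast_nonneg _)]
  simp only [Int.toNat_natCast]
  rw [← land_land127 i hi]
  exact decide_eq_decide.mpr Nat.cast_inj

theorem band127_pos (b : Int) (hb : 0 ≤ b) :
    PySem.Int.band b 127 = ((b.toNat &&& 127 : Nat) : Int) := by
  unfold PySem.Int.band
  rw [if_pos hb, if_pos (by norm_num)]
  rfl

theorem band127_neg (b : Int) (hb : ¬ 0 ≤ b) :
    PySem.Int.band b 127 = (((127 - (127 &&& (-b - 1).toNat) : Nat)) : Int) := by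
  unfold PySem.Int.band
  rw [if_neg hb, if_pos (by norm_num)]
  rfl

theorem decode_pos (b : Int) (hb : 0 ≤ b) : decode_digit b = chain (b.toNat &&& 127) := by
  unfold decode_digit chain
  simp only [List.range_succ, List.range_zero, List.map_cons, List.map_nil,
    List.nil_append, List.cons_append, List.getD, List.getElem?_cons_zero, List.getElem?_cons_succ,
    Option.getD_some,
    pyBit_eval_pos b hb 0 (by omega), pyBit_eval_pos b hb 1 (by omega),
    pyBit_eval_pos b hb 2 (by omega), pyBit_eval_pos b hb 3 (by omega),
    pyBit_eval_pos b hb 4 (by omega), pyBit_eval_pos b hb 5 (by omega),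
    pyBit_eval_pos b hb 6 (by omega)]

theorem decode_neg (b : Int) (hb : ¬ 0 ≤ b) :
    decode_digit b = chainN (127 &&& (-b - 1).toNat) := by
  unfold decode_digit chainN
  simp only [List.range_succ, List.range_zero, List.map_cons, List.map_nil,
    List.nil_append, List.cons_append, List.getD, List.getElem?_cons_zero, List.getElem?_cons_succ,
    Option.getD_some,
    pyBit_eval_neg b hb 0 (by omega), pyBit_eval_neg b hb 1 (by omega),
    pyBit_eval_neg b hb 2 (by omega), pyBit_eval_neg b hb 3 (by omega),
    pyBit_eval_neg b hb 4 (by omega), pyBit_eval_neg b hb 5 (by omega),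
    pyBit_eval_neg b hb 6 (by omega)]

theorem alt_eval (b : Int) : decode_digit_alt b = altOf (PySem.Int.band b 127) := rfl

theorem land127_le (n : Nat) : n &&& 127 ≤ 127 := Nat.and_le_right

theorem land127_le' (n : Nat) : 127 &&& n ≤ 127 := Nat.and_le_left

theorem band_eq_mod (b : Int) : PySem.Int.band b 127 = b % 128 := by
  by_cases hb : 0 ≤ b
  · rw [band127_pos b hb]
    have h : b.toNat &&& 127 = b.toNat % 128 := Nat.and_two_pow_sub_one_eq_mod b.toNat 7
    omega
  · rw [band127_neg b hb]
    have h : 127 &&& (-b - 1).toNat = (-b - 1).toNat % 128 := by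
      rw [Nat.land_comm]; exact Nat.and_two_pow_sub_one_eq_mod _ 7
    omega

theorem pre_mem (b : Int) (h : Pre_decode_digit b) :
    PySem.Int.band b 127 ∈ ([63, 6, 91, 79, 102, 109, 125, 7, 127, 111] : List Int) := by
  rw [band_eq_mod]
  obtain ⟨d, hd, hget⟩ := h
  simp only [List.mem_range] at hd
  interval_cases d <;>
    (simp only [segPatterns, List.getElem?_cons_zero, List.getElem?_cons_succ,
      Option.some_inj] at hget; simp only [List.mem_cons, List.not_mem_nil, or_false]; omega)

set_option maxRecDepth 100000 in
theorem fact_pos : ∀ t : Nat, t < 128 →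
    ((t : Int) ∈ ([63, 6, 91, 79, 102, 109, 125, 7, 127, 111] : List Int) →
      chain t = altOf (t : Int)) := by decide

set_option maxRecDepth 100000 in
theorem fact_neg : ∀ t : Nat, t < 128 →
    (((127 - t : Nat) : Int) ∈ ([63, 6, 91, 79, 102, 109, 125, 7, 127, 111] : List Int) →
      chainN t = altOf ((127 - t : Nat) : Int)) := by decide

-- ===== VERDICT (by name: the statement is the Claim_ definition above) =====
theorem decode_digit_spec : Claim_equal_decode_digit := by
  intro b _ hpre0
  unfold Spec_decode_digit
  have hpre := pre_mem b hpre0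
  by_cases hb : 0 ≤ b
  · rw [decode_pos b hb, alt_eval, band127_pos b hb]
    rw [band127_pos b hb] at hpre
    exact fact_pos _ (by have := land127_le b.toNat; omega) hpre
  · rw [decode_neg b hb, alt_eval, band127_neg b hb]
    rw [band127_neg b hb] at hpre
    exact fact_neg (127 &&& (-b - 1).toNat)
      (by have := land127_le' (-b - 1).toNat; omega) hpre
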